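-- pv_equiv track=rewrite | github.com/zantyru/wrk-Python121-exercises-02 | 2022_04_04/set0001_z01_v3.py | compute_loops_in_digit_glyphs
-- ===== SOURCE A (Python) =====
-- def compute_loops_in_digit_glyphs(n):
--     s = str(n)
--     result = 0
--     for digit in s:
--         if digit in ("0", "6", "9"):
--             result += 1
--         elif digit == "8":
--             result += 2
--     return result
-- ===== SOURCE B (Python) =====
-- def compute_loops_in_digit_glyphs(n):
--     s = str(n)
--     return s.count("0") + s.count("6") + s.count("9") + 2 * s.count("8")
-- ===== Notes on version B (the rewrite author's own statement) =====
-- stated objective: idiomatic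
-- what changed: Replaces the classifying accumulator loop over the digits with a closed arithmetic combination of per-glyph str.count passes (no branching or loop state).
import Mathlib
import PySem

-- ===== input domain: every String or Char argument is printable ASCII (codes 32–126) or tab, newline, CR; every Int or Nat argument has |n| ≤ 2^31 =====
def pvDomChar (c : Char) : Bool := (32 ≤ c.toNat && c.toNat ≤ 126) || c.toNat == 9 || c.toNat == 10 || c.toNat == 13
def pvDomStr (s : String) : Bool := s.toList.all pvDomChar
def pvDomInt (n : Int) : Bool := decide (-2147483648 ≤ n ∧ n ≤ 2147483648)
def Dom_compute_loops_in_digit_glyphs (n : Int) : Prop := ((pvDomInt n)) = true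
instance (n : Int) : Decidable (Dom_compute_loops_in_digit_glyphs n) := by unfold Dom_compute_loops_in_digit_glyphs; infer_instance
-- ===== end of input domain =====

-- B replaces A's classifying accumulator loop with a closed sum of per-glyph counting passes (idiomatic, same cost).

-- ===== PORT A =====
-- s = str(n); result = 0; for digit in s: if digit in ("0","6","9"): result += 1 elif digit == "8": result += 2
def compute_loops_in_digit_glyphs (n : Int) : Int :=
  let s := PySem.Int.toStr n
  s.toList.foldl
    (fun result digit =>
      if digit = '0' ∨ digit = '6' ∨ digit = '9' then result + 1
      else if digit = '8' then result + 2
      else result) 0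

-- ===== PORT B =====
-- s = str(n); return s.count("0") + s.count("6") + s.count("9") + 2 * s.count("8")
def compute_loops_in_digit_glyphs_alt (n : Int) : Int :=
  let s := PySem.Int.toStr n
  (PySem.Str.count s "0" : Int) + (PySem.Str.count s "6" : Int)
    + (PySem.Str.count s "9" : Int) + 2 * (PySem.Str.count s "8" : Int)

-- ===== PRECONDITION & SPEC =====
def Spec_compute_loops_in_digit_glyphs (n : Int) (out : Int) : Prop := out = compute_loops_in_digit_glyphs_alt n
instance (n : Int) (out : Int) : Decidable (Spec_compute_loops_in_digit_glyphs n out) := by unfold Spec_compute_loops_in_digit_glyphs; infer_instance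

-- ===== CLAIM (what is proved, stated in full; the proofs are below) =====
def Claim_equal_compute_loops_in_digit_glyphs : Prop := ∀ (n : Int), Dom_compute_loops_in_digit_glyphs n → Spec_compute_loops_in_digit_glyphs n (compute_loops_in_digit_glyphs n)

-- ===== LEMMAS AND PROOFS =====

-- Python str.count with a single-character needle is List.count.
theorem count_go_single (c : Char) : ∀ (l : List Char) (fuel acc : Nat),
    l.length ≤ fuel → PySem.Chars.count.go [c] fuel l acc = acc + l.count c := by
  intro l
  induction l with
  | nil =>
      intro fuel acc _
      cases fuel <;> simp [PySem.Chars.count.go]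
  | cons h t ih =>
      intro fuel acc hle
      cases fuel with
      | zero => simp at hle
      | succ f =>
          rw [PySem.Chars.count.go]
          have hle' : t.length ≤ f := by simpa using hle
          by_cases hc : h = c
          · subst hc
            simp only [List.isPrefixOf, beq_self_eq_true, Bool.and_self, if_pos,
              List.length_cons, List.length_nil, List.drop_succ_cons, List.drop_zero]
            rw [ih f (acc + 1) hle']
            simp
            omega
          · have hp : List.isPrefixOf [c] (h :: t) = false := by
              simp [List.isPrefixOf]; exact fun e => (hc e.symm).elim
            rw [if_neg (by simp [hp]), ih f acc hle']
            have hch : ¬ (c = h) := fun e => hc e.symm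
            simp [List.count_cons]
            exact hc

theorem chars_count_single (l : List Char) (c : Char) :
    PySem.Chars.count l [c] = l.count c := by
  simp [PySem.Chars.count, count_go_single c l l.length 0 le_rfl]

-- A's fold equals the weighted sum of per-character counts.
theorem foldA (l : List Char) (a : Int) :
    l.foldl
      (fun result digit =>
        if digit = '0' ∨ digit = '6' ∨ digit = '9' then result + 1
        else if digit = '8' then result + 2
        else result) a
    = a + (l.count '0' : Int) + (l.count '6' : Int) + (l.count '9' : Int)
        + 2 * (l.count '8' : Int) := by
  induction l generalizing a with
  | nil => simp
  | cons h t ih =>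
      simp only [List.foldl_cons, ih, List.count_cons]
      by_cases h0 : h = '0'
      · subst h0; simp; ring
      · by_cases h6 : h = '6'
        · subst h6; simp; ring
        · by_cases h9 : h = '9'
          · subst h9; simp; ring
          · by_cases h8 : h = '8'
            · subst h8; simp; ring
            · simp [h0, h6, h9, h8]

-- ===== VERDICT (by name: the statement is the Claim_ definition above) =====
theorem compute_loops_in_digit_glyphs_spec : Claim_equal_compute_loops_in_digit_glyphs := by
  intro n _
  unfold Spec_compute_loops_in_digit_glyphs compute_loops_in_digit_glyphs compute_loops_in_digit_glyphs_alt
  simp only [PySem.Str.count_eq, foldA]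
  have h0 := chars_count_single (PySem.Int.toStr n).toList '0'
  have h6 := chars_count_single (PySem.Int.toStr n).toList '6'
  have h9 := chars_count_single (PySem.Int.toStr n).toList '9'
  have h8 := chars_count_single (PySem.Int.toStr n).toList '8'
  simp only [show ("0" : String).toList = ['0'] from rfl, show ("6" : String).toList = ['6'] from rfl,
    show ("9" : String).toList = ['9'] from rfl, show ("8" : String).toList = ['8'] from rfl,
    h0, h6, h9, h8]
  ring
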